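-- pv_equiv track=rewrite | github.com/FireworksWD/Algorithm-python- | 算法/学校OJ/动态规划/无聊的逗.py | dhset
-- ===== SOURCE A (Python) =====
-- def dhset(n):
--     total=sum(n)
--     tar=sum(n)//2
--     if total%2:
--         return False,tar
--     dp=[True]+[False]*tar
--     for i in n:
--         for j in range(tar,i-1,-1):
--             dp[j]=dp[j] or dp[j-i]
--     return dp[-1],tar
-- ===== SOURCE B (Python) =====
-- def dhset(n):
--     total = sum(n)
--     tar = total // 2
--     if total % 2:
--         return False, tar
--     bits = 1
--     for i in n:
--         bits |= bits << i
--     return bool((bits >> tar) & 1), tar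
-- ===== Notes on version B (the rewrite author's own statement) =====
-- stated objective: faster
-- what changed: Replaces the boolean-array subset-sum DP (inner index loop per element) with a big-integer bitset: one shift-or per element, reading the answer as bit tar.
-- outside the precondition, e.g. on dhset([-1, -1]): A returns (True, -1), B raises ValueError; on dhset([2, -2]): A raises IndexError, B raises ValueError
import Mathlib
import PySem

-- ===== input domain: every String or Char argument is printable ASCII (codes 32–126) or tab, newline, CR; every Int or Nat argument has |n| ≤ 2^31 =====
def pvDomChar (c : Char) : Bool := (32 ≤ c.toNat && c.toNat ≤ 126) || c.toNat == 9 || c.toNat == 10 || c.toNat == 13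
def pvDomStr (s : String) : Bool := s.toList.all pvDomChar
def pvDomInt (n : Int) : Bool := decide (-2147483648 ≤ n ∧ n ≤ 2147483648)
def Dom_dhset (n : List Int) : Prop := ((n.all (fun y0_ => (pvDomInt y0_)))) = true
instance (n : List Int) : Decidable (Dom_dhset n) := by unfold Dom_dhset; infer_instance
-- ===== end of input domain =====

-- B replaces the boolean-array subset-sum DP with a big-integer bitset (one shift-or per
-- element), intended as a constant-factor (word-parallel) speed-up.

-- ===== PORT A =====
-- '%' and '/' on Int with the positive divisor 2 coincide with Python's % and //.
def dhset (n : List Int) : Bool × Int :=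
  let total := n.sum
  let tar := n.sum / 2
  if total % 2 ≠ 0 then (false, tar)
  else
    let dp : List Bool := true :: List.replicate tar.toNat false
    let dp := n.foldl (fun dp i =>
      (PySem.List.pyRange tar (i - 1) (-1)).foldl (fun dp j =>
        PySem.List.pySetD dp j
          (PySem.List.pyGetD dp j false || PySem.List.pyGetD dp (j - i) false)) dp) dp
    (PySem.List.pyGetD dp (-1) false, tar)

-- ===== PORT B =====
def dhset_alt (n : List Int) : Bool × Int :=
  let total := n.sum
  let tar := total / 2
  if total % 2 ≠ 0 then (false, tar)
  else
    let bits : Nat := n.foldl (fun bits i => bits ||| (bits <<< i.toNat)) 1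
    (((bits >>> tar.toNat) &&& 1) == 1, tar)

-- ===== PRECONDITION & SPEC =====
-- Pre_ excludes even-total lists containing a negative element: there A either raises
-- IndexError or returns an accidental value via negative-index wraparound, and B's
-- big-int shift raises ValueError.
def Pre_dhset (n : List Int) : Prop := n.sum % 2 ≠ 0 ∨ ∀ x ∈ n, 0 ≤ x
instance (n : List Int) : Decidable (Pre_dhset n) := by unfold Pre_dhset; infer_instance
def pvWitness_dhset : List Int := [1, 5, 11, 5]

def Spec_dhset (n : List Int) (out : Bool × Int) : Prop := out = dhset_alt n
instance (n : List Int) (out : Bool × Int) : Decidable (Spec_dhset n out) := by unfold Spec_dhset; infer_instance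

-- ===== CLAIM (what is proved, stated in full; the proofs are below) =====
def Claim_equal_dhset : Prop := ∀ (n : List Int), Dom_dhset n → Pre_dhset n → Spec_dhset n (dhset n)

-- ===== LEMMAS AND PROOFS =====

-- the body of A's inner loop, named so the lemmas below can speak about it
def innerF (i : Int) (dp : List Bool) (j : Int) : List Bool :=
  PySem.List.pySetD dp j
    (PySem.List.pyGetD dp j false || PySem.List.pyGetD dp (j - i) false)

theorem getD_set_bool (l : List Bool) (nn k : Nat) (v d : Bool) (hn : nn < l.length) :
    (l.set nn v).getD k d = if k = nn then v else l.getD k d := by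
  rcases eq_or_ne k nn with rfl | hne
  · simp [List.getD_eq_getElem?_getD, hn]
  · simp [List.getD_eq_getElem?_getD, hne, (Ne.symm hne)]

-- the inner Python loop 'for j in range(h, i-1, -1): dp[j] = dp[j] or dp[j-i]' updates
-- each index k with i ≤ k ≤ h to dp[k] || dp[k-i] and leaves every other index unchanged
theorem dhset_inner (i : Int) (hi : 0 ≤ i) (m : Nat) :
    ∀ (h : Int) (dp : List Bool), h < (dp.length : Int) → (h - i + 1).toNat ≤ m →
    ((PySem.List.pyRange h (i - 1) (-1)).foldl (innerF i) dp).length = dp.length ∧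
      ∀ k : Nat, ((PySem.List.pyRange h (i - 1) (-1)).foldl (innerF i) dp).getD k false =
        if (k : Int) ≤ h ∧ i ≤ (k : Int) then
          dp.getD k false || dp.getD ((k : Int) - i).toNat false
        else dp.getD k false := by
  induction m with
  | zero =>
    intro h dp hlen hm
    rw [PySem.List.pyRange_neg_one_eq_nil (by omega : h ≤ i - 1), List.foldl_nil]
    exact ⟨rfl, fun k => by rw [if_neg (by omega)]⟩
  | succ m ih =>
    intro h dp hlen hm
    by_cases hc : h ≤ i - 1
    · rw [PySem.List.pyRange_neg_one_eq_nil hc, List.foldl_nil]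
      exact ⟨rfl, fun k => by rw [if_neg (by omega)]⟩
    · have hih : i ≤ h := by omega
      have h0h : 0 ≤ h := le_trans hi hih
      rw [PySem.List.pyRange_neg_one_cons (by omega : i - 1 < h), List.foldl_cons]
      have hv : innerF i dp h
          = dp.set h.toNat (dp.getD h.toNat false || dp.getD (h - i).toNat false) := by
        unfold innerF
        rw [PySem.List.pySetD_of_nonneg dp _ h0h, PySem.List.pyGetD_of_nonneg dp _ h0h,
          PySem.List.pyGetD_of_nonneg dp _ (by omega : (0:Int) ≤ h - i)]
      have hlen1 : (innerF i dp h).length = dp.length := by rw [hv]; simp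
      have hT : h.toNat < dp.length := by omega
      have hset : ∀ k : Nat, (innerF i dp h).getD k false =
          if k = h.toNat then dp.getD h.toNat false || dp.getD (h - i).toNat false
          else dp.getD k false := fun k => by
        rw [hv]; exact getD_set_bool dp h.toNat k _ false hT
      obtain ⟨ihlen, ihchar⟩ := ih (h - 1) (innerF i dp h)
        (by rw [hlen1]; omega) (by omega)
      refine ⟨by rw [ihlen, hlen1], fun k => ?_⟩
      rw [ihchar k]
      by_cases hk1 : (k : Int) ≤ h - 1 ∧ i ≤ (k : Int)
      · rw [if_pos hk1, if_pos ⟨by omega, hk1.2⟩, hset k, hset ((k : Int) - i).toNat,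
          if_neg (by omega), if_neg (by omega)]
      · rw [if_neg hk1]
        by_cases hk2 : (k : Int) = h
        · have hkh : k = h.toNat := by omega
          rw [hset k, if_pos hkh, if_pos ⟨by omega, by omega⟩, hk2, hkh]
        · rw [hset k, if_neg (by omega : ¬ k = h.toNat),
            if_neg (by omega : ¬ ((k : Int) ≤ h ∧ i ≤ (k : Int)))]

-- the invariant across the outer loop: dp holds exactly the low T+1 bits of bits
theorem dhset_outer (T : Nat) :
    ∀ (l : List Int), (∀ x ∈ l, 0 ≤ x) → ∀ (dp : List Bool) (bits : Nat),
    dp.length = T + 1 → (∀ k : Nat, k ≤ T → dp.getD k false = bits.testBit k) →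
    (l.foldl (fun dp i => (PySem.List.pyRange (T : Int) (i - 1) (-1)).foldl (innerF i) dp) dp).length = T + 1 ∧
      ∀ k : Nat, k ≤ T →
        (l.foldl (fun dp i => (PySem.List.pyRange (T : Int) (i - 1) (-1)).foldl (innerF i) dp) dp).getD k false
          = (l.foldl (fun bits i => bits ||| (bits <<< i.toNat)) bits).testBit k := by
  intro l
  induction l with
  | nil => intro _ dp bits hlen hinv; exact ⟨hlen, fun k hk => by simpa using hinv k hk⟩
  | cons i l ihl =>
    intro hnn dp bits hlen hinv
    have hi : (0 : Int) ≤ i := hnn i List.mem_cons_self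
    obtain ⟨len1, char1⟩ := dhset_inner i hi ((T : Int) - i + 1).toNat (T : Int) dp
      (by rw [hlen]; exact_mod_cast by omega) le_rfl
    rw [List.foldl_cons, List.foldl_cons]
    apply ihl (fun x hx => hnn x (List.mem_cons_of_mem i hx))
    · rw [len1, hlen]
    · intro k hk
      rw [char1 k, Nat.testBit_or, Nat.testBit_shiftLeft]
      by_cases hik : i ≤ (k : Int)
      · have hnat : ((k : Int) - i).toNat = k - i.toNat := by omega
        rw [if_pos ⟨by omega, hik⟩, hinv k hk, hnat,
          hinv (k - i.toNat) (by omega)]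
        simp [show i.toNat ≤ k by omega]
      · rw [if_neg (by omega), hinv k hk]
        simp [show ¬ i.toNat ≤ k by omega]

theorem shift_and_one (b n : Nat) : (((b >>> n) &&& 1) == 1) = b.testBit n := by
  simp [Nat.testBit, Nat.and_one_is_mod]

theorem testBit_one_pos (k : Nat) (h : 0 < k) : Nat.testBit 1 k = false := by
  cases k with
  | zero => omega
  | succ j => simp [Nat.testBit_add_one]

-- ===== VERDICT (by name: the statement is the Claim_ definition above) =====
theorem dhset_spec : Claim_equal_dhset := by
  unfold Claim_equal_dhset
  intro n _ hpre
  unfold Spec_dhset dhset dhset_alt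
  by_cases hodd : n.sum % 2 = 0
  · simp only [hodd, ne_eq, not_true_eq_false, if_false]
    have hnn : ∀ x ∈ n, 0 ≤ x := by
      rcases hpre with h | h
      · exact absurd hodd h
      · exact h
    have htot : 0 ≤ n.sum := List.sum_nonneg hnn
    have htar : 0 ≤ n.sum / 2 := Int.ediv_nonneg htot (by norm_num)
    set T : Nat := (n.sum / 2).toNat with hTdef
    have hTcast : (T : Int) = n.sum / 2 := Int.toNat_of_nonneg htar
    have hinit_len : (true :: List.replicate T false).length = T + 1 := by simp
    have hinit : ∀ k : Nat, k ≤ T →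
        (true :: List.replicate T false).getD k false = Nat.testBit 1 k := by
      intro k hk
      cases k with
      | zero => simp
      | succ j =>
        rw [testBit_one_pos (j + 1) (by omega)]
        simp [List.getD_eq_getElem?_getD, List.getElem?_replicate]
        split <;> rfl
    obtain ⟨_, hchar⟩ := dhset_outer T n hnn (true :: List.replicate T false) 1
      hinit_len hinit
    rw [← hTcast]
    have hfold_eq :
        n.foldl (fun dp i =>
          (PySem.List.pyRange ((T : Nat) : Int) (i - 1) (-1)).foldl (fun dp j =>
            PySem.List.pySetD dp j
              (PySem.List.pyGetD dp j false || PySem.List.pyGetD dp (j - i) false)) dp)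
          (true :: List.replicate T false)
        = n.foldl (fun dp i =>
            (PySem.List.pyRange ((T : Nat) : Int) (i - 1) (-1)).foldl (innerF i) dp)
          (true :: List.replicate T false) := rfl
    rw [hfold_eq]
    obtain ⟨hlenf, _⟩ := dhset_outer T n hnn (true :: List.replicate T false) 1
      hinit_len hinit
    have hneg : PySem.List.pyGetD
        (n.foldl (fun dp i =>
          (PySem.List.pyRange ((T : Nat) : Int) (i - 1) (-1)).foldl (innerF i) dp)
          (true :: List.replicate T false)) (-1) false
        = (n.foldl (fun dp i =>
            (PySem.List.pyRange ((T : Nat) : Int) (i - 1) (-1)).foldl (innerF i) dp)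
            (true :: List.replicate T false)).getD T false := by
      generalize hgen : n.foldl (fun dp i =>
          (PySem.List.pyRange ((T : Nat) : Int) (i - 1) (-1)).foldl (innerF i) dp)
          (true :: List.replicate T false) = L
      rw [hgen] at hlenf
      simp [PySem.List.pyGetD, PySem.List.pyGet?, PySem.List.pyIdx?, hlenf,
        List.getD_eq_getElem?_getD]
    rw [hneg, hchar T le_rfl, shift_and_one]
  · simp only [hodd, ne_eq, not_false_eq_true, if_true]
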